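-- pv_equiv track=rewrite | github.com/HucksApp/Coeus | Data_collector/text_collector.py | _extract_problem_solution
-- ===== SOURCE A (Python) =====
-- def _extract_problem_solution(text):
--     """Extract problem and solution pairs from the text (basic example)."""
--     # You can enhance this method with more advanced NLP or pattern matching
--     problem_keywords = ["problem", "issue", "challenge"]
--     solution_keywords = ["solution", "fix", "resolution"]
--     problem = None
--     solution = None
--
--     # Simple extraction approach (can be expanded with NLP or regex)
--     for sentence in text.split("\n"):
--         if any(keyword in sentence.lower() for keyword in problem_keywords):
--             problem = sentence.strip()
--         if any(keyword in sentence.lower() for keyword in solution_keywords):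
--             solution = sentence.strip()
--
--     if problem and solution:
--         return {"problem": problem, "solution": solution}
--     return None
-- ===== SOURCE B (Python) =====
-- def _extract_problem_solution(text):
--     """Extract problem and solution pairs from the text (basic example)."""
--     problem_keywords = ["problem", "issue", "challenge"]
--     solution_keywords = ["solution", "fix", "resolution"]
--     problem = None
--     solution = None
--
--     # Scan from the bottom up: the first match in reverse order is the last
--     # match in document order, so earlier lines can never change the result
--     # and we may stop as soon as both slots are filled.
--     for sentence in reversed(text.split("\n")):
--         if problem is None and any(keyword in sentence.lower() for keyword in problem_keywords):
--             problem = sentence.strip()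
--         if solution is None and any(keyword in sentence.lower() for keyword in solution_keywords):
--             solution = sentence.strip()
--         if problem is not None and solution is not None:
--             break
--
--     if problem and solution:
--         return {"problem": problem, "solution": solution}
--     return None
-- ===== Notes on version B (the rewrite author's own statement) =====
-- stated objective: alternative
-- what changed: A scans all lines forward letting every keyword match overwrite its slot; B scans the lines in reverse, fills each slot only once (first match in reverse = last match forward) and breaks out as soon as both problem and solution are found.
import Mathlib
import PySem

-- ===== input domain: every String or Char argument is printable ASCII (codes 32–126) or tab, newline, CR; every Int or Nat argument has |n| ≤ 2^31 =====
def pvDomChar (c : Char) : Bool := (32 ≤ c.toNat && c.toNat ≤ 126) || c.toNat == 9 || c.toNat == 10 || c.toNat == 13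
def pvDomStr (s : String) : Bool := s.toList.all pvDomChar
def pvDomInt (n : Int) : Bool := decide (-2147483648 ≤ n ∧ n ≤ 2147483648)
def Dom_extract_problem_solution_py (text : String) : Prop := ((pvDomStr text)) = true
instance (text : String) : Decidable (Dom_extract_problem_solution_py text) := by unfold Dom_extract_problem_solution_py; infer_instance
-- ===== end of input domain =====

-- B replaces A's full forward pass (every match overwrites its slot) by a reverse scan that keeps
-- the first match per slot and breaks once both are filled (objective: alternative).

-- ===== PORT A =====
-- A's keyword tests 'any(keyword in sentence.lower() for keyword in …)', named as helpers
def pvProblemMatch (sentence : String) : Bool :=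
  (["problem", "issue", "challenge"] : List String).any (fun keyword => PySem.Str.isIn keyword (PySem.Str.lower sentence))
def pvSolutionMatch (sentence : String) : Bool :=
  (["solution", "fix", "resolution"] : List String).any (fun keyword => PySem.Str.isIn keyword (PySem.Str.lower sentence))

-- literal port of A: one forward fold over all lines, each match OVERWRITES its slot
def extract_problem_solution_py (text : String) : Option (List (String × String)) :=
  let st := ((PySem.Str.split? text "\n").getD []).foldl
    (fun (ps : Option String × Option String) sentence =>
      (if pvProblemMatch sentence then some (PySem.Str.strip sentence) else ps.1,
       if pvSolutionMatch sentence then some (PySem.Str.strip sentence) else ps.2))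
    (none, none)
  -- 'if problem and solution:' — both non-None and (Python truthiness) non-empty
  match st with
  | (some p, some s) => if p ≠ "" ∧ s ≠ "" then some [("problem", p), ("solution", s)] else none
  | _ => none

-- ===== PORT B =====
-- B's own keyword tests (same Python expressions, B-side copies)
def pvAltProblemMatch (sentence : String) : Bool :=
  (["problem", "issue", "challenge"] : List String).any (fun keyword => PySem.Str.isIn keyword (PySem.Str.lower sentence))
def pvAltSolutionMatch (sentence : String) : Bool :=
  (["solution", "fix", "resolution"] : List String).any (fun keyword => PySem.Str.isIn keyword (PySem.Str.lower sentence))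
-- literal port of B's loop: reverse scan, fill only still-empty slots, break when both are filled
def pvAltLoop (lines : List String) (problem solution : Option String) : Option String × Option String :=
  match lines with
  | [] => (problem, solution)
  | sentence :: rest =>
    let problem := if problem = none ∧ pvAltProblemMatch sentence
      then some (PySem.Str.strip sentence) else problem
    let solution := if solution = none ∧ pvAltSolutionMatch sentence
      then some (PySem.Str.strip sentence) else solution
    if problem ≠ none ∧ solution ≠ none then (problem, solution)   -- break
    else pvAltLoop rest problem solution

def extract_problem_solution_py_alt (text : String) : Option (List (String × String)) :=
  let ps := pvAltLoop ((PySem.Str.split? text "\n").getD []).reverse none none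
  match ps.1 with
  | none => none
  | some p =>
    match ps.2 with
    | none => none
    | some s => if p ≠ "" ∧ s ≠ "" then some [("problem", p), ("solution", s)] else none

-- ===== PRECONDITION & SPEC =====
def Spec_extract_problem_solution_py (text : String) (out : Option (List (String × String))) : Prop := out = extract_problem_solution_py_alt text
instance (text : String) (out : Option (List (String × String))) : Decidable (Spec_extract_problem_solution_py text out) := by unfold Spec_extract_problem_solution_py; infer_instance

-- ===== CLAIM (what is proved, stated in full; the proofs are below) =====
def Claim_equal_extract_problem_solution_py : Prop := ∀ (text : String), Dom_extract_problem_solution_py text → Spec_extract_problem_solution_py text (extract_problem_solution_py text)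

-- ===== LEMMAS AND PROOFS =====

-- A's fold: each slot ends as the LAST forward match = the first match of the reversed list
theorem pvFoldA_eq (l : List String) (p s : Option String) :
    l.foldl (fun (ps : Option String × Option String) sentence =>
        (if pvProblemMatch sentence then some (PySem.Str.strip sentence) else ps.1,
         if pvSolutionMatch sentence then some (PySem.Str.strip sentence) else ps.2)) (p, s)
      = ((l.reverse.find? pvProblemMatch).map PySem.Str.strip |>.or p,
         (l.reverse.find? pvSolutionMatch).map PySem.Str.strip |>.or s) := by
  induction l generalizing p s with
  | nil => simp
  | cons x t ih =>
    rw [List.foldl_cons]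
    dsimp only
    rw [ih, List.reverse_cons, List.find?_append]
    cases hpm : pvProblemMatch x <;> cases hsm : pvSolutionMatch x <;>
      simp [List.find?, hpm, hsm]

-- B's loop: the break only skips lines that cannot change two already-filled slots,
-- so each slot is its initial value, else the FIRST match of the scanned list
theorem pvAltLoop_eq (l : List String) (p s : Option String) :
    pvAltLoop l p s
      = (p.or ((l.find? pvAltProblemMatch).map PySem.Str.strip),
         s.or ((l.find? pvAltSolutionMatch).map PySem.Str.strip)) := by
  induction l generalizing p s with
  | nil => simp [pvAltLoop]
  | cons x t ih =>
    simp only [pvAltLoop]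
    cases p with
    | some a =>
      cases s with
      | some b => simp
      | none => cases hsm : pvAltSolutionMatch x <;> simp [List.find?, hsm, ih]
    | none =>
      cases s with
      | some b => cases hpm : pvAltProblemMatch x <;> simp [List.find?, hpm, ih]
      | none =>
        cases hpm : pvAltProblemMatch x <;> cases hsm : pvAltSolutionMatch x <;>
          simp [List.find?, hpm, hsm, ih]

-- the two loop states coincide
theorem pvStates_eq (l : List String) :
    l.foldl (fun (ps : Option String × Option String) sentence =>
        (if pvProblemMatch sentence then some (PySem.Str.strip sentence) else ps.1,
         if pvSolutionMatch sentence then some (PySem.Str.strip sentence) else ps.2)) (none, none)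
      = pvAltLoop l.reverse none none := by
  rw [pvFoldA_eq, pvAltLoop_eq,
    show pvAltProblemMatch = pvProblemMatch from rfl,
    show pvAltSolutionMatch = pvSolutionMatch from rfl]
  simp

-- ===== VERDICT (by name: the statement is the Claim_ definition above) =====
theorem extract_problem_solution_py_spec : Claim_equal_extract_problem_solution_py := by
  intro text _
  unfold Spec_extract_problem_solution_py
  simp only [extract_problem_solution_py, extract_problem_solution_py_alt, pvStates_eq]
  rcases h : pvAltLoop ((PySem.Str.split? text "\n").getD []).reverse none none with ⟨p0, s0⟩
  cases p0 <;> cases s0 <;> rfl
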